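-- pv_equiv track=rewrite | github.com/lolguinan/aoc-py | src/year2021/day13a.py | solve
-- ===== SOURCE A (Python) =====
-- import collections
-- import math
--
-- ParsedInput = tuple[list[tuple[int, int]], list[tuple[str, int]]]
--
-- Grid = collections.Counter[tuple[int, int], int]
--
-- def make_fold(grid: Grid, fold_instruction: tuple[str, int]) -> Grid:
--     fold_along, fold_at = fold_instruction
--
--     folded_grid = collections.Counter()
--     for x, y in grid:
--         dx, dy = x, y
--         if fold_along == "x" and x > fold_at:
--             dx = fold_at - (x - fold_at)
--         elif fold_along == "y" and y > fold_at:
--             dy = fold_at - (y - fold_at)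
--         folded_grid.update([(dx, dy)])
--         if (x, y) != (dx, dy):
--             folded_grid.subtract([(x, y)])
--             if folded_grid[(x, y)] <= 0:
--                 del folded_grid[(x, y)]
--
--     return folded_grid
--
-- def solve(data: ParsedInput, max_folds=math.inf) -> int:
--     dots, folds = data
--     grid = collections.Counter(dots)
--     for index, fold in enumerate(folds):
--         if index >= max_folds:
--             break
--         grid = make_fold(grid, fold)
--     return len(grid)
-- ===== SOURCE B (Python) =====
-- import math
--
-- def solve(data, max_folds=math.inf):
--     dots, folds = data
--     applied = [fold for index, fold in enumerate(folds) if index < max_folds]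
--
--     def final_pos(p):
--         x, y = p
--         for along, at in applied:
--             if along == "x" and x > at:
--                 x = 2 * at - x
--             elif along == "y" and y > at:
--                 y = 2 * at - y
--         return (x, y)
--
--     return len({final_pos(p) for p in dots})
-- ===== Notes on version B (the rewrite author's own statement) =====
-- stated objective: faster
-- what changed: B is dot-major: instead of rebuilding a Counter grid for every fold (A's make_fold re-counts, subtracts and deletes entries per fold), B folds each dot's coordinates through all applied folds in one pass and counts the distinct final positions with a set.
import Mathlib
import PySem

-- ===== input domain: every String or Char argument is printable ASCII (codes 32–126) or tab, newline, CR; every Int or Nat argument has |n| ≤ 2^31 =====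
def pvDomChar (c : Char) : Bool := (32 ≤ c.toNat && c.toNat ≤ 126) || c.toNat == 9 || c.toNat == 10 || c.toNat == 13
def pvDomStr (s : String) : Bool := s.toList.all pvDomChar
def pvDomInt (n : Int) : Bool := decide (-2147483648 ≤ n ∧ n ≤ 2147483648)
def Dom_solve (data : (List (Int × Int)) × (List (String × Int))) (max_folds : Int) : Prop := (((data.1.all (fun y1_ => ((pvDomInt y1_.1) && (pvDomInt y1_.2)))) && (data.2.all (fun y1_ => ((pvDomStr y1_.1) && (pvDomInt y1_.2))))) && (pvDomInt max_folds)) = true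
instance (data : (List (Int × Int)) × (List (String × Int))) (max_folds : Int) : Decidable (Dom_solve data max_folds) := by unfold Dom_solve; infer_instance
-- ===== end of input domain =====

-- B replaces A's fold-major Counter rebuilds by a dot-major single pass (fold every dot
-- through all applied folds, count distinct final positions in a set); measurably faster
-- by a constant factor. Equality of the RETURN value is proved; neither mutates its input.

-- ===== PORT A =====
-- body of make_fold's 'for x, y in grid' loop
def makeFoldBody (fold_along : String) (fold_at : Int)
    (folded_grid : PySem.Dict (Int × Int) Int) (xy : Int × Int) :
    PySem.Dict (Int × Int) Int :=
  let x := xy.1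
  let y := xy.2
  let d : Int × Int :=
    if fold_along == "x" && decide (x > fold_at) then (fold_at - (x - fold_at), y)
    else if fold_along == "y" && decide (y > fold_at) then (x, fold_at - (y - fold_at))
    else (x, y)
  -- folded_grid.update([(dx, dy)])
  let g1 := folded_grid.insert d (folded_grid.getD d 0 + 1)
  if (x, y) ≠ d then
    -- folded_grid.subtract([(x, y)]); del it if its count dropped to ≤ 0
    let g2 := g1.insert (x, y) (g1.getD (x, y) 0 - 1)
    if g2.getD (x, y) 0 ≤ 0 then g2.erase (x, y) else g2
  else g1

def makeFold (grid : PySem.Dict (Int × Int) Int) (fold_instruction : String × Int) :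
    PySem.Dict (Int × Int) Int :=
  (PySem.Dict.keys grid).foldl (makeFoldBody fold_instruction.1 fold_instruction.2)
    PySem.Dict.empty

-- body of solve's fold loop; the Bool records whether 'break' has fired
def solveLoopBody (max_folds : Int) (st : PySem.Dict (Int × Int) Int × Bool)
    (e : Int × (String × Int)) : PySem.Dict (Int × Int) Int × Bool :=
  if st.2 then st
  else if e.1 ≥ max_folds then (st.1, true)
  else (makeFold st.1 e.2, false)

def solve (data : (List (Int × Int)) × (List (String × Int))) (max_folds : Int) : Int :=
  let dots := data.1
  let folds := data.2
  let grid := PySem.Dict.counter dots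
  (((PySem.List.enumerate folds).foldl (solveLoopBody max_folds) (grid, false)).1.size : Int)

-- ===== PORT B =====
-- one fold instruction applied to one point (the body of final_pos's loop)
def foldPoint (p : Int × Int) (f : String × Int) : Int × Int :=
  if f.1 == "x" && decide (p.1 > f.2) then (2 * f.2 - p.1, p.2)
  else if f.1 == "y" && decide (p.2 > f.2) then (p.1, 2 * f.2 - p.2)
  else p

def solve_alt (data : (List (Int × Int)) × (List (String × Int))) (max_folds : Int) : Int :=
  let dots := data.1
  let folds := data.2
  let applied :=
    ((PySem.List.enumerate folds).filter (fun e => decide (e.1 < max_folds))).map (·.2)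
  let result : PySem.Set (Int × Int) :=
    dots.foldl (fun s p => PySem.Set.add s (applied.foldl foldPoint p)) PySem.Set.empty
  (result.length : Int)

-- ===== PRECONDITION & SPEC =====
def Spec_solve (data : (List (Int × Int)) × (List (String × Int))) (max_folds : Int) (out : Int) : Prop := out = solve_alt data max_folds
instance (data : (List (Int × Int)) × (List (String × Int))) (max_folds : Int) (out : Int) : Decidable (Spec_solve data max_folds out) := by unfold Spec_solve; infer_instance

-- ===== CLAIM (what is proved, stated in full; the proofs are below) =====
def Claim_equal_solve : Prop := ∀ (data : (List (Int × Int)) × (List (String × Int))) (max_folds : Int), Dom_solve data max_folds → Spec_solve data max_folds (solve data max_folds)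

-- ===== LEMMAS AND PROOFS =====

-- every key of the grid built while folding along f lies on the kept side of f
def OnKeptSide (f : String × Int) (k : Int × Int) : Prop :=
  (f.1 = "x" → k.1 ≤ f.2) ∧ (f.1 = "y" → k.2 ≤ f.2)

theorem erase_insert_of_not_contains {κ ν : Type} [BEq κ] [LawfulBEq κ]
    (d : PySem.Dict κ ν) (k : κ) (v : ν) (h : d.contains k = false) :
    (d.insert k v).erase k = d := by
  apply PySem.Dict.ext
  simp only [PySem.Dict.erase, PySem.Dict.items_insert_of_not_contains (h := h),
    List.filter_append]
  simp
  intro a b hab hak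
  subst hak
  simp [PySem.Dict.contains] at h
  exact h a b hab rfl

theorem foldPoint_onKeptSide (f : String × Int) (p : Int × Int) :
    OnKeptSide f (foldPoint p f) := by
  unfold foldPoint OnKeptSide
  split_ifs with h1 h2 <;> simp_all <;> omega

theorem not_onKeptSide_of_moved (f : String × Int) (p : Int × Int)
    (h : p ≠ foldPoint p f) : ¬ OnKeptSide f p := by
  unfold foldPoint at h
  unfold OnKeptSide
  split_ifs at h with h1 h2
  · simp at h1; intro hk; have := hk.1 h1.1; omega
  · simp at h2; intro hk; have := hk.2 h2.1; omega
  · exact absurd rfl h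

theorem makeFoldBody_keys (f : String × Int) (g : PySem.Dict (Int × Int) Int)
    (p : Int × Int) (hn : g.keys.Nodup) (hp : ∀ k ∈ g.keys, OnKeptSide f k) :
    (makeFoldBody f.1 f.2 g p).keys.Nodup ∧
    (∀ k ∈ (makeFoldBody f.1 f.2 g p).keys, OnKeptSide f k) ∧
    (∀ k, k ∈ (makeFoldBody f.1 f.2 g p).keys ↔ k ∈ g.keys ∨ k = foldPoint p f) := by
  have hd : (if f.1 == "x" && decide (p.1 > f.2) then (f.2 - (p.1 - f.2), p.2)
      else if f.1 == "y" && decide (p.2 > f.2) then (p.1, f.2 - (p.2 - f.2))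
      else (p.1, p.2)) = foldPoint p f := by
    unfold foldPoint
    split_ifs <;> simp [Prod.ext_iff] <;> omega
  unfold makeFoldBody
  simp only [hd]
  by_cases hpq : (p.1, p.2) = foldPoint p f
  · rw [if_neg (by simp [hpq])]
    refine ⟨PySem.Dict.nodup_keys_insert _ _ _ hn, ?_, ?_⟩
    · intro k hk
      rcases (PySem.Dict.mem_keys_insert _ _ _ _).1 hk with h | h
      · subst h; exact foldPoint_onKeptSide f p
      · exact hp k h
    · intro k
      rw [PySem.Dict.mem_keys_insert]
      tauto
  · rw [if_pos hpq]
    have hpp : (p.1, p.2) = p := rfl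
    rw [hpp] at hpq
    have hnot : ¬ OnKeptSide f p := not_onKeptSide_of_moved f p hpq
    have hpg : p ∉ g.keys := fun h => hnot (hp p h)
    have hpg1 : p ∉ (g.insert (foldPoint p f) (g.getD (foldPoint p f) 0 + 1)).keys := by
      rw [PySem.Dict.mem_keys_insert]
      rintro (h | h)
      · exact hnot (h ▸ foldPoint_onKeptSide f p)
      · exact hpg h
    have hc1 : (g.insert (foldPoint p f) (g.getD (foldPoint p f) 0 + 1)).contains p = false := by
      cases hcb : (g.insert (foldPoint p f) (g.getD (foldPoint p f) 0 + 1)).contains p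
      · rfl
      · exact absurd ((PySem.Dict.contains_iff_mem_keys _ _).1 hcb) hpg1
    have hgd : (g.insert (foldPoint p f) (g.getD (foldPoint p f) 0 + 1)).getD p 0 = 0 :=
      PySem.Dict.getD_of_not_contains _ _ hc1
    rw [hpp, hgd]
    rw [PySem.Dict.getD_insert_self]
    rw [if_pos (by omega : (0 : Int) - 1 ≤ 0)]
    rw [erase_insert_of_not_contains _ _ _ hc1]
    refine ⟨PySem.Dict.nodup_keys_insert _ _ _ hn, ?_, ?_⟩
    · intro k hk
      rcases (PySem.Dict.mem_keys_insert _ _ _ _).1 hk with h | h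
      · subst h; exact foldPoint_onKeptSide f p
      · exact hp k h
    · intro k
      rw [PySem.Dict.mem_keys_insert]
      tauto

theorem foldl_makeFoldBody_keys (f : String × Int) (l : List (Int × Int))
    (g : PySem.Dict (Int × Int) Int) (hn : g.keys.Nodup)
    (hp : ∀ k ∈ g.keys, OnKeptSide f k) :
    (l.foldl (makeFoldBody f.1 f.2) g).keys.Nodup ∧
    (∀ k ∈ (l.foldl (makeFoldBody f.1 f.2) g).keys, OnKeptSide f k) ∧
    (∀ k, k ∈ (l.foldl (makeFoldBody f.1 f.2) g).keys ↔
      k ∈ g.keys ∨ ∃ p ∈ l, k = foldPoint p f) := by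
  induction l generalizing g with
  | nil => exact ⟨hn, hp, fun k => by simp⟩
  | cons p l ih =>
    obtain ⟨h1, h2, h3⟩ := makeFoldBody_keys f g p hn hp
    obtain ⟨i1, i2, i3⟩ := ih _ h1 h2
    refine ⟨i1, i2, ?_⟩
    intro k
    simp only [List.foldl_cons] at *
    rw [i3 k, h3 k]
    simp only [List.mem_cons]
    constructor
    · rintro ((h | h) | ⟨q, hq, rfl⟩)
      · exact Or.inl h
      · exact Or.inr ⟨p, Or.inl rfl, h⟩
      · exact Or.inr ⟨q, Or.inr hq, rfl⟩
    · rintro (h | ⟨q, (rfl | hq), rfl⟩)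
      · exact Or.inl (Or.inl h)
      · exact Or.inl (Or.inr rfl)
      · exact Or.inr ⟨q, hq, rfl⟩

theorem makeFold_keys (grid : PySem.Dict (Int × Int) Int) (f : String × Int) :
    (makeFold grid f).keys.Nodup ∧
    (∀ k, k ∈ (makeFold grid f).keys ↔ ∃ p ∈ grid.keys, k = foldPoint p f) := by
  unfold makeFold
  obtain ⟨h1, _, h3⟩ := foldl_makeFoldBody_keys f grid.keys PySem.Dict.empty
    (by simp [PySem.Dict.keys_empty]) (by simp [PySem.Dict.keys_empty])
  refine ⟨h1, fun k => ?_⟩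
  rw [h3 k]
  simp [PySem.Dict.keys_empty]

theorem foldl_makeFold_keys (L : List (String × Int)) (g : PySem.Dict (Int × Int) Int)
    (hg : g.keys.Nodup) :
    (L.foldl makeFold g).keys.Nodup ∧
    (∀ k, k ∈ (L.foldl makeFold g).keys ↔ ∃ p ∈ g.keys, k = L.foldl foldPoint p) := by
  induction L generalizing g with
  | nil => exact ⟨hg, by simp⟩
  | cons f L ih =>
    obtain ⟨m1, m2⟩ := makeFold_keys g f
    obtain ⟨i1, i2⟩ := ih (makeFold g f) m1
    refine ⟨i1, fun k => ?_⟩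
    simp only [List.foldl_cons]
    rw [i2 k]
    constructor
    · rintro ⟨q, hq, rfl⟩
      obtain ⟨p, hp, rfl⟩ := (m2 q).1 hq
      exact ⟨p, hp, rfl⟩
    · rintro ⟨p, hp, rfl⟩
      exact ⟨foldPoint p f, (m2 _).2 ⟨p, hp, rfl⟩, rfl⟩

theorem foldl_solveLoopBody_broken (m : Int) (l : List (Int × (String × Int)))
    (g : PySem.Dict (Int × Int) Int) :
    l.foldl (solveLoopBody m) (g, true) = (g, true) := by
  induction l with
  | nil => rfl
  | cons e l ih => simpa [solveLoopBody] using ih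

theorem solveLoop_eq_filter (m : Int) (folds : List (String × Int)) (s : Int)
    (g : PySem.Dict (Int × Int) Int) :
    ((PySem.List.enumerate folds s).foldl (solveLoopBody m) (g, false)).1 =
    (((PySem.List.enumerate folds s).filter (fun e => decide (e.1 < m))).map (·.2)).foldl
      makeFold g := by
  induction folds generalizing s g with
  | nil => simp [PySem.List.enumerate_nil]
  | cons f folds ih =>
    rw [PySem.List.enumerate_cons]
    by_cases hs : s ≥ m
    · have hbody : solveLoopBody m (g, false) (s, f) = (g, true) := by
        simp [solveLoopBody, hs]
      rw [List.foldl_cons, hbody, foldl_solveLoopBody_broken]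
      have hfil : (PySem.List.enumerate folds (s + 1)).filter (fun e => decide (e.1 < m)) = [] := by
        rw [List.filter_eq_nil_iff]
        intro e he
        obtain ⟨k, hk, rfl⟩ := (PySem.List.mem_enumerate_iff _ _ _).1 he
        simp only [decide_eq_true_eq]
        omega
      rw [List.filter_cons, if_neg (by simp; omega), hfil]
      rfl
    · have hbody : solveLoopBody m (g, false) (s, f) = (makeFold g f, false) := by
        simp [solveLoopBody, hs]
      rw [List.foldl_cons, hbody, ih]
      rw [List.filter_cons, if_pos (by simp; omega)]
      rfl

-- ===== VERDICT (by name: the statement is the Claim_ definition above) =====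
theorem solve_spec : Claim_equal_solve := by
  intro data max_folds _
  unfold Spec_solve solve solve_alt
  simp only []
  set dots := data.1
  set folds := data.2
  set applied := ((PySem.List.enumerate folds).filter (fun e => decide (e.1 < max_folds))).map (·.2) with happ
  -- A's loop with break = fold of makeFold over the applied folds
  rw [solveLoop_eq_filter, ← happ]
  -- B's set = set(dots.map image)
  have himg : dots.foldl (fun s p => PySem.Set.add s (applied.foldl foldPoint p))
      PySem.Set.empty = PySem.Set.ofList (dots.map (fun p => applied.foldl foldPoint p)) := by
    rw [← PySem.Set.update_map_eq_foldl_add, PySem.Set.update_empty]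
  rw [himg]
  -- A's final dict keys: nodup, members = images of dots
  obtain ⟨hn, hmem⟩ := foldl_makeFold_keys applied (PySem.Dict.counter dots)
    (PySem.Dict.nodup_keys_counter dots)
  have hperm : (applied.foldl makeFold (PySem.Dict.counter dots)).keys.Perm
      (PySem.Set.ofList (dots.map (fun p => applied.foldl foldPoint p))) := by
    rw [List.perm_ext_iff_of_nodup hn (PySem.Set.nodup_ofList _)]
    intro k
    rw [hmem k, PySem.Set.mem_ofList, List.mem_map]
    constructor
    · rintro ⟨p, hp, rfl⟩
      rw [PySem.Dict.keys_counter, PySem.Set.mem_ofList] at hp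
      exact ⟨p, hp, rfl⟩
    · rintro ⟨p, hp, rfl⟩
      exact ⟨p, by rw [PySem.Dict.keys_counter, PySem.Set.mem_ofList]; exact hp, rfl⟩
  have hkeys : (applied.foldl makeFold (PySem.Dict.counter dots)).items.length
      = (PySem.Set.ofList (dots.map (fun p => applied.foldl foldPoint p))).length := by
    have h := hperm.length_eq
    simpa [PySem.Dict.keys] using h
  simp only [PySem.Dict.size]
  exact_mod_cast hkeys
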